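-- pv_equiv track=rewrite | github.com/hackersclub29/Highrandom | ran2.py | calculate_character_sum
-- ===== SOURCE A (Python) =====
-- import string
--
-- def char_to_number_mapping():
--     """
--     Create a mapping for characters to numbers:
--       - Lowercase letters: a=1, b=2, …, z=26
--       - Uppercase letters: A=28, B=29, …
--       - Digits: 0=55, 1=56, …, 9=64
--
--     Returns:
--         dict: Mapping for letters and digits.
--     """
--     mapping = {char: idx for idx, char in enumerate(string.ascii_lowercase, start=1)}
--     mapping.update({char: idx for idx, char in enumerate(string.ascii_uppercase, start=28)})
--     mapping.update({char: idx for idx, char in enumerate(string.digits, start=55)})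
--     return mapping
--
-- def calculate_character_sum(input_string):
--     """
--     Calculate the total sum of characters in the string based on a predefined mapping.
--     For special characters not in the mapping, their ASCII value plus 66 is added.
--
--     Args:
--         input_string (str): The string whose characters are to be summed.
--
--     Returns:
--         int: The resulting total sum.
--     """
--     mapping = char_to_number_mapping()
--     total_sum = 0
--     for char in input_string:
--         if char in mapping:
--             total_sum += mapping[char]
--         else:
--             total_sum += ord(char) + 66  # For special characters
--     return total_sum
-- ===== SOURCE B (Python) =====
-- def calculate_character_sum(input_string):
--     # Aggregate formula instead of per-character branching:
--     # every char contributes ord(c)+66 baseline; letters/digits get a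
--     # class-wide rebate (lowercase 162, uppercase 103, digits 59),
--     # so the sum is computed from raw ord-sum plus three class counts.
--     n = len(input_string)
--     baseline = sum(map(ord, input_string)) + 66 * n
--     lower = sum('a' <= c <= 'z' for c in input_string)
--     upper = sum('A' <= c <= 'Z' for c in input_string)
--     digit = sum('0' <= c <= '9' for c in input_string)
--     return baseline - 162 * lower - 103 * upper - 59 * digit
-- ===== Notes on version B (the rewrite author's own statement) =====
-- stated objective: alternative
-- what changed: Replaced the mapping-dict lookup loop with a closed aggregate formula: the raw ord-sum plus a 66-per-char baseline, corrected by class-wide rebates computed from three character-class counts (lowercase 162, uppercase 103, digits 59).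
import Mathlib
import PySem

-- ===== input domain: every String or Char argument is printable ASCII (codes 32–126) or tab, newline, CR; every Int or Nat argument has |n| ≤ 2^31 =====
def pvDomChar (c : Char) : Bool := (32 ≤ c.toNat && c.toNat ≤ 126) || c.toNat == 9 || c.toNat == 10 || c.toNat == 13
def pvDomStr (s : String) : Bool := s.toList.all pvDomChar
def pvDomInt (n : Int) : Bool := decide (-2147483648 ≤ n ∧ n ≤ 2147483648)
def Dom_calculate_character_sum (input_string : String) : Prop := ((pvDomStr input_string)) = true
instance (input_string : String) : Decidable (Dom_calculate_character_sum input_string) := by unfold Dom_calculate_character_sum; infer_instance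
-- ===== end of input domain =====

-- B replaces A's per-character mapping-dict lookup loop by an aggregate formula: ord-sum + 66*len minus class-count rebates.


-- ===== PORT A =====
-- dict comprehension over string.ascii_lowercase starting at 1, then .update with uppercase (28) and digits (55)
def char_to_number_mapping : PySem.Dict Char Int :=
  let mapping := PySem.Dict.ofList
    ((PySem.List.enumerate "abcdefghijklmnopqrstuvwxyz".toList 1).map (fun p => (p.2, p.1)))
  let mapping := (PySem.List.enumerate "ABCDEFGHIJKLMNOPQRSTUVWXYZ".toList 28).foldl
    (fun d p => d.insert p.2 p.1) mapping
  let mapping := (PySem.List.enumerate "0123456789".toList 55).foldl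
    (fun d p => d.insert p.2 p.1) mapping
  mapping

def calculate_character_sum (input_string : String) : Int :=
  let mapping := char_to_number_mapping
  input_string.toList.foldl
    (fun total_sum char =>
      if mapping.contains char then total_sum + mapping.getD char 0
      else total_sum + ((char.toNat : Int) + 66))
    0

-- ===== PORT B =====
def calculate_character_sum_alt (input_string : String) : Int :=
  let n : Int := input_string.toList.length
  let baseline : Int := (input_string.toList.map (fun c => (c.toNat : Int))).sum + 66 * n
  let lower : Int := (input_string.toList.countP (fun c => decide ('a' ≤ c ∧ c ≤ 'z')) : Nat)
  let upper : Int := (input_string.toList.countP (fun c => decide ('A' ≤ c ∧ c ≤ 'Z')) : Nat)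
  let digit : Int := (input_string.toList.countP (fun c => decide ('0' ≤ c ∧ c ≤ '9')) : Nat)
  baseline - 162 * lower - 103 * upper - 59 * digit

-- ===== PRECONDITION & SPEC =====
def Spec_calculate_character_sum (input_string : String) (out : Int) : Prop := out = calculate_character_sum_alt input_string
instance (input_string : String) (out : Int) : Decidable (Spec_calculate_character_sum input_string out) := by unfold Spec_calculate_character_sum; infer_instance

-- ===== CLAIM =====
def Claim_equal_calculate_character_sum : Prop := ∀ (input_string : String), Dom_calculate_character_sum input_string → Spec_calculate_character_sum input_string (calculate_character_sum input_string)

-- ===== LEMMAS AND PROOFS =====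
def pvStepA (c : Char) : Int :=
  if char_to_number_mapping.contains c then char_to_number_mapping.getD c 0
  else (c.toNat : Int) + 66

def pvStepC (c : Char) : Int :=
  ((c.toNat : Int) + 66)
    - (if 'a' ≤ c ∧ c ≤ 'z' then 162 else 0)
    - (if 'A' ≤ c ∧ c ≤ 'Z' then 103 else 0)
    - (if '0' ≤ c ∧ c ≤ '9' then 59 else 0)

set_option maxRecDepth 20000 in
theorem pvStep_eq_fin : ∀ n : Fin 127, pvStepA (Char.ofNat n.val) = pvStepC (Char.ofNat n.val) := by
  decide

set_option maxRecDepth 20000 in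
theorem pvStep_eq (c : Char) (h : pvDomChar c = true) : pvStepA c = pvStepC c := by
  have hlt : c.toNat < 127 := by
    simp [pvDomChar] at h
    omega
  have hc : Char.ofNat c.toNat = c := Char.ofNat_toNat c
  have h := pvStep_eq_fin ⟨c.toNat, hlt⟩
  rwa [show ((⟨c.toNat, hlt⟩ : Fin 127) : Nat) = c.toNat from rfl, hc] at h

theorem pvFoldA_sum (l : List Char) (a : Int) :
    l.foldl (fun t c => t + pvStepA c) a = a + (l.map pvStepA).sum := by
  induction l generalizing a with
  | nil => simp
  | cons x xs ih => simp [List.foldl_cons, ih (a + pvStepA x)]; ring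

theorem pvB_sum (l : List Char) :
    ((l.map (fun c => (c.toNat : Int))).sum + 66 * (l.length : Int))
      - 162 * ((l.countP (fun c => decide ('a' ≤ c ∧ c ≤ 'z')) : Nat) : Int)
      - 103 * ((l.countP (fun c => decide ('A' ≤ c ∧ c ≤ 'Z')) : Nat) : Int)
      - 59 * ((l.countP (fun c => decide ('0' ≤ c ∧ c ≤ '9')) : Nat) : Int)
    = (l.map pvStepC).sum := by
  induction l with
  | nil => simp
  | cons x xs ih =>
    have hx : pvStepC x = ((x.toNat : Int) + 66)
        - (if 'a' ≤ x ∧ x ≤ 'z' then (162 : Int) else 0)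
        - (if 'A' ≤ x ∧ x ≤ 'Z' then (103 : Int) else 0)
        - (if '0' ≤ x ∧ x ≤ '9' then (59 : Int) else 0) := rfl
    simp only [List.map_cons, List.sum_cons, List.length_cons, List.countP_cons]
    rw [← ih, hx]
    push_cast
    split_ifs <;> simp_all <;> linarith [ih]

set_option maxRecDepth 40000 in
theorem pvMap_eq (l : List Char) (h : l.all pvDomChar = true) :
    l.map pvStepA = l.map pvStepC := by
  induction l with
  | nil => rfl
  | cons x xs ih =>
    simp only [List.all_cons, Bool.and_eq_true] at h
    simp [pvStep_eq x h.1, ih h.2]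

-- ===== VERDICT =====
set_option maxRecDepth 40000 in
theorem calculate_character_sum_spec : Claim_equal_calculate_character_sum := by
  intro s hdom
  unfold Spec_calculate_character_sum calculate_character_sum calculate_character_sum_alt
  have h1 : (fun (t : Int) (c : Char) =>
      if char_to_number_mapping.contains c then t + char_to_number_mapping.getD c 0
      else t + ((c.toNat : Int) + 66)) = (fun t c => t + pvStepA c) := by
    funext t c; simp only [pvStepA]; split <;> rfl
  simp only [h1, pvFoldA_sum, zero_add, pvMap_eq s.toList hdom]
  rw [← pvB_sum]
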